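-- pv_equiv track=rewrite | github.com/ambitioninc/django-narrative | narrative/batteries/uptime.py | detect_temporal_clusters
-- ===== SOURCE A (Python) =====
-- def compute_interval_list(time_list):
--     """
--     Given a series of times, return the intervals between them as well
--     as the median interval.
--
--     NOTE: assumes that the time_list is sorted in ascending order.
--     """
--     interval_list = [time_list[idx] - time_list[idx - 1] for idx in range(1, len(time_list))]
--     interval_list_len = len(interval_list)
--
--     return interval_list, interval_list[int(interval_list_len / 2)]
--
-- def detect_temporal_clusters(time_list):
--     """
--     Break the times in the time_list into a series of clusters based
--     on changes in the median interval between times.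
--
--     The ideas is that we look at the intervals between elements in the
--     list, take the median interval, then tweat any interval much bigger
--     than that as indicating the start of a new cluster.
--
--     Note: assumes that time_list is sorted in ascending order.
--     """
--     time_list_len = len(time_list)
--
--     if time_list_len > 1:
--         interval_list, new_cluster_threshold = compute_interval_list(time_list)
--
--         clusters = [[time_list[0]]]
--
--         for idx in range(1, len(time_list)):
--             if interval_list[idx - 1] > new_cluster_threshold:
--                 # The interval past is too much; start a new cluster
--                 clusters.append([time_list[idx]])
--             else:
--                 # This time was close enough to the last one to be in
--                 # in the same cluster
--                 clusters[-1].append(time_list[idx])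
--
--         return clusters, new_cluster_threshold
--     elif time_list_len == 1:
--         return [time_list], 0
--     return [], 0
-- ===== SOURCE B (Python) =====
-- def detect_temporal_clusters(time_list):
--     n = len(time_list)
--     if n == 0:
--         return [], 0
--     if n == 1:
--         return [time_list], 0
--     diffs = [b - a for a, b in zip(time_list, time_list[1:])]
--     threshold = diffs[len(diffs) // 2]
--     # build the clusters back to front, keeping each cluster reversed,
--     # then flip everything once at the end
--     rev_current = [time_list[-1]]
--     rev_clusters = []
--     for t, d in zip(reversed(time_list[:-1]), reversed(diffs)):
--         if d > threshold:
--             rev_clusters.append(rev_current)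
--             rev_current = [t]
--         else:
--             rev_current.append(t)
--     rev_clusters.append(rev_current)
--     clusters = [c[::-1] for c in reversed(rev_clusters)]
--     return clusters, threshold
-- ===== Notes on version B (the rewrite author's own statement) =====
-- stated objective: alternative
-- what changed: B builds the clusters back-to-front: it folds over the (time, interval) pairs from the right, prepending either a fresh cluster or onto the first cluster, instead of A's forward index loop that appends each time to the last cluster of a growing list-of-lists.
import Mathlib
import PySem

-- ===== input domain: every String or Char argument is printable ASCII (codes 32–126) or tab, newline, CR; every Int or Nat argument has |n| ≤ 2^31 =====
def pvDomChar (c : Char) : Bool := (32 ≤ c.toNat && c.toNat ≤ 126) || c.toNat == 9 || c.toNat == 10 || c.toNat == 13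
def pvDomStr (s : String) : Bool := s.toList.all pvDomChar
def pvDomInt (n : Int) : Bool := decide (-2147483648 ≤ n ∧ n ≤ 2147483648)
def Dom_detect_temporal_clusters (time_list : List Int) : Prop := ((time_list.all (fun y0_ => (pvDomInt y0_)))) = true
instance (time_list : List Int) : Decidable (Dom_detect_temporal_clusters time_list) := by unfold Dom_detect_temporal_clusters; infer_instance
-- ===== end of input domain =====

-- B builds the same clusters back-to-front (a right fold prepending to the first cluster)
-- instead of A's forward index loop appending to the last cluster; same cost, alternative decomposition.

-- ===== PORT A =====
-- helper of A; A only calls it with len ≥ 2, so every index below is in range and the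
-- `pyGetD … 0` defaults (pyGet? = none would be Python's IndexError) are never taken there
def compute_interval_list (time_list : List Int) : List Int × Int :=
  let interval_list := (PySem.List.pyRange 1 (time_list.length : Int)).map
    (fun idx => PySem.List.pyGetD time_list idx 0 - PySem.List.pyGetD time_list (idx - 1) 0)
  let interval_list_len : Int := (interval_list.length : Int)
  -- int(interval_list_len / 2): exact trunc division on this domain
  (interval_list, PySem.List.pyGetD interval_list (PySem.Int.truncdiv interval_list_len 2) 0)

def detect_temporal_clusters (time_list : List Int) : List (List Int) × Int :=
  let time_list_len := time_list.length
  if time_list_len > 1 then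
    let p := compute_interval_list time_list
    let interval_list := p.1
    let new_cluster_threshold := p.2
    -- clusters[-1].append(x) is ported as dropLast ++ [last ++ [x]] (clusters is never empty)
    let clusters := (PySem.List.pyRange 1 (time_list.length : Int)).foldl
      (fun clusters idx =>
        if PySem.List.pyGetD interval_list (idx - 1) 0 > new_cluster_threshold then
          clusters ++ [[PySem.List.pyGetD time_list idx 0]]
        else
          clusters.dropLast ++ [(clusters.getLast?.getD []) ++ [PySem.List.pyGetD time_list idx 0]])
      [[PySem.List.pyGetD time_list 0 0]]
    (clusters, new_cluster_threshold)
  else if time_list_len = 1 then ([time_list], 0)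
  else ([], 0)

-- ===== PORT B =====
def detect_temporal_clusters_alt (time_list : List Int) : List (List Int) × Int :=
  let n := time_list.length
  if n = 0 then ([], 0)
  else if n = 1 then ([time_list], 0)
  else
    let diffs := (List.zip time_list (PySem.List.slice time_list (some 1) none)).map
      (fun p => p.2 - p.1)
    let threshold := PySem.List.pyGetD diffs (PySem.Int.floordiv (diffs.length : Int) 2) 0
    -- the reversed-zip loop over two variables is a left fold over the reversed pair list
    -- with a pair state (rev_current, rev_clusters)
    let st := (List.zip (PySem.List.slice time_list none (some (-1))).reverse diffs.reverse).foldl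
      (fun st td =>
        if td.2 > threshold then ([td.1], st.2 ++ [st.1])
        else (st.1 ++ [td.1], st.2))
      ([PySem.List.pyGetD time_list (-1) 0], ([] : List (List Int)))
    let rev_clusters := st.2 ++ [st.1]
    -- c[::-1] is list reversal (exact)
    let clusters := rev_clusters.reverse.map (fun c => c.reverse)
    (clusters, threshold)

-- ===== PRECONDITION & SPEC =====
def Spec_detect_temporal_clusters (time_list : List Int) (out : List (List Int) × Int) : Prop := out = detect_temporal_clusters_alt time_list
instance (time_list : List Int) (out : List (List Int) × Int) : Decidable (Spec_detect_temporal_clusters time_list out) := by unfold Spec_detect_temporal_clusters; infer_instance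

-- ===== CLAIM (what is proved, stated in full; the proofs are below) =====
def Claim_equal_detect_temporal_clusters : Prop := ∀ (time_list : List Int), Dom_detect_temporal_clusters time_list → Spec_detect_temporal_clusters time_list (detect_temporal_clusters time_list)

-- ===== LEMMAS AND PROOFS =====

-- the consecutive differences both programs compute
def pvDiffs (tl : List Int) : List Int := List.zipWith (fun a b => b - a) tl tl.tail

-- the common grouping both loops realise: walk the (interval, time) pairs left to right,
-- carrying the current cluster
def pvGroup (thr : Int) : List Int → List (Int × Int) → List (List Int)
  | c, [] => [c]
  | c, (d, t) :: ps =>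
    if d > thr then c :: pvGroup thr [t] ps else pvGroup thr (c ++ [t]) ps

theorem pvGroup_cons (thr x : Int) (c : List Int) (ps : List (Int × Int)) :
    pvGroup thr (x :: c) ps
      = (x :: (pvGroup thr c ps).headD []) :: (pvGroup thr c ps).tail := by
  induction ps generalizing c with
  | nil => simp [pvGroup]
  | cons p ps ih =>
    obtain ⟨d, t⟩ := p
    simp only [pvGroup]
    split
    · rfl
    · rw [show x :: c ++ [t] = x :: (c ++ [t]) from rfl, ih]

-- A's forward fold realises pvGroup
theorem pvFoldl_eq_pvGroup (thr : Int) (ps : List (Int × Int)) (acc : List (List Int))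
    (c : List Int) :
    ps.foldl (fun clusters p =>
        if p.1 > thr then clusters ++ [[p.2]]
        else clusters.dropLast ++ [(clusters.getLast?.getD []) ++ [p.2]]) (acc ++ [c])
      = acc ++ pvGroup thr c ps := by
  induction ps generalizing acc c with
  | nil => simp [pvGroup]
  | cons p ps ih =>
    obtain ⟨d, t⟩ := p
    simp only [List.foldl_cons, pvGroup]
    by_cases h : d > thr
    · simp only [h, if_pos]
      rw [show acc ++ [c] ++ [[t]] = (acc ++ [c]) ++ [[t]] from rfl, ih]
      simp
    · simp only [h, if_false]
      rw [List.dropLast_concat, List.getLast?_concat]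
      simp only [Option.getD_some]
      rw [ih]

-- zip of two reverses of equal-length lists is the reverse of the zip
theorem pvZipReverse (l m : List Int) (h : l.length = m.length) :
    List.zip l.reverse m.reverse = (List.zip l m).reverse := by
  induction l generalizing m with
  | nil => simp
  | cons a l ih =>
    cases m with
    | nil => simp at h
    | cons b m =>
      have h' : l.length = m.length := by simpa using h
      simp only [List.reverse_cons, List.zip_cons_cons, List.reverse_cons]
      rw [List.zip_append (by simp [h']), ih m h']
      simp

-- B's right fold over the pair state realises pvGroup
theorem pvFoldrPair (thr : Int) (r : List Int) (x : Int) :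
    (((List.zip ((x :: r).dropLast) (pvDiffs (x :: r))).foldr
        (fun (td : Int × Int) st =>
          if td.2 > thr then ([td.1], st.2 ++ [st.1])
          else (st.1 ++ [td.1], st.2))
        ([r.getLastD x], ([] : List (List Int)))).2
      ++ [((List.zip ((x :: r).dropLast) (pvDiffs (x :: r))).foldr
        (fun (td : Int × Int) st =>
          if td.2 > thr then ([td.1], st.2 ++ [st.1])
          else (st.1 ++ [td.1], st.2))
        ([r.getLastD x], ([] : List (List Int)))).1]).reverse.map (fun c => c.reverse)
      = pvGroup thr [x] (List.zip (pvDiffs (x :: r)) r) := by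
  induction r generalizing x with
  | nil => simp [pvDiffs, pvGroup]
  | cons y r ih =>
    simp only [pvDiffs, List.tail_cons, List.zipWith_cons_cons, List.dropLast_cons₂,
      List.zip_cons_cons, List.foldr_cons]
    rw [show (y :: r).getLastD x = r.getLastD y from List.getLastD_cons,
      show List.zipWith (fun a b => b - a) (y :: r) r = pvDiffs (y :: r) from rfl]
    have ihy := ih y
    simp only [List.reverse_append, List.map_cons, List.reverse_cons, List.reverse_nil,
      List.nil_append, List.cons_append] at ihy ⊢
    by_cases h : y - x > thr
    · simp only [h, if_pos, List.reverse_append, List.map_cons, List.reverse_cons,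
        List.reverse_nil, List.nil_append, List.cons_append]
      rw [ihy]
      simp [pvGroup, h]
    · simp only [h, if_false, List.reverse_append, List.reverse_cons,
        List.reverse_nil, List.nil_append, List.cons_append]
      conv_rhs => rw [show pvGroup thr [x] ((y - x, y) :: List.zip (pvDiffs (y :: r)) r)
          = pvGroup thr ([x] ++ [y]) (List.zip (pvDiffs (y :: r)) r) from by
            simp [pvGroup, h],
        show ([x] ++ [y] : List Int) = x :: [y] from rfl, pvGroup_cons, ← ihy]
      simp

-- pyRange 1 (n+1) enumerates 1..n
theorem pvRange_one_eq (n : Nat) :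
    PySem.List.pyRange 1 ((n : Int) + 1) = (List.range n).map (fun k : Nat => ((k : Int) + 1)) := by
  induction n with
  | zero => decide
  | succ m ih =>
    have h : PySem.List.pyRange 1 (((m : Int) + 1) + 1)
        = PySem.List.pyRange 1 ((m : Int) + 1) ++ [(m : Int) + 1] :=
      PySem.List.pyRange_one_succ_right (by omega)
    rw [show ((m + 1 : Nat) : Int) + 1 = ((m : Int) + 1) + 1 by push_cast; ring, h, ih,
      List.range_succ]
    simp

-- fold over range with a getter = fold over the list
theorem pvFoldl_range_getD {γ : Type} (zs : List (Int × Int)) (g : γ → Int × Int → γ)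
    (acc : γ) :
    (List.range zs.length).foldl (fun a k => g a (zs.getD k (0, 0))) acc = zs.foldl g acc := by
  induction zs using List.reverseRecOn generalizing acc with
  | nil => simp
  | append_singleton ws w ih =>
    rw [List.length_append, List.length_singleton, List.range_succ, List.foldl_append,
      List.foldl_append]
    have hpre : (List.range ws.length).foldl
        (fun a k => g a ((ws ++ [w]).getD k (0, 0))) acc
        = (List.range ws.length).foldl (fun a k => g a (ws.getD k (0, 0))) acc := by
      apply PySem.List.foldl_congr_mem
      intro a k hk
      have hk' : k < ws.length := List.mem_range.mp hk
      simp [List.getElem?_append_left hk']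
    rw [hpre, ih]
    simp

-- A's interval list = pvDiffs
theorem pvIntervalList_eq (tl : List Int) :
    (PySem.List.pyRange 1 (tl.length : Int)).map
      (fun idx => PySem.List.pyGetD tl idx 0 - PySem.List.pyGetD tl (idx - 1) 0)
      = pvDiffs tl := by
  cases tl with
  | nil => decide
  | cons x ts =>
    rw [show ((x :: ts).length : Int) = (ts.length : Int) + 1 by simp, pvRange_one_eq]
    apply List.ext_getElem
    · simp [pvDiffs]
    · intro i h1 h2
      simp only [List.getElem_map, List.getElem_range]
      have e1 : ((i : Int) + 1) = ((i + 1 : Nat) : Int) := by push_cast; ring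
      rw [e1, PySem.List.pyGetD_natCast]
      have e2 : ((i + 1 : Nat) : Int) - 1 = ((i : Nat) : Int) := by push_cast; ring
      rw [e2, PySem.List.pyGetD_natCast]
      have hi : i < ts.length := by simpa [pvDiffs] using h2
      rw [List.getD_eq_getElem _ _ (by simp; omega), List.getD_eq_getElem _ _ (by simp; omega)]
      simp [pvDiffs, List.getElem_zipWith]

-- int(m / 2) and m // 2 agree on nonnegative m
theorem pvHalf (m : Nat) : PySem.Int.truncdiv (m : Int) 2 = PySem.Int.floordiv (m : Int) 2 := by
  rw [PySem.Int.floordiv_eq_ediv_of_pos (by norm_num)]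
  show Int.tdiv _ _ = _
  rw [Int.tdiv_eq_ediv]
  omega

theorem pvZipMapDiffs (tl : List Int) :
    (List.zip tl tl.tail).map (fun p => p.2 - p.1) = pvDiffs tl := by
  rw [List.zip, List.map_zipWith]
  rfl

-- A's whole loop, starting from [[x]], computes pvGroup over zip (pvDiffs tl) tl.tail
theorem pvFoldA (x : Int) (ts : List Int) (thr : Int) :
    (PySem.List.pyRange 1 (((x :: ts).length : Int))).foldl
      (fun clusters idx =>
        if PySem.List.pyGetD (pvDiffs (x :: ts)) (idx - 1) 0 > thr then
          clusters ++ [[PySem.List.pyGetD (x :: ts) idx 0]]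
        else
          clusters.dropLast ++ [(clusters.getLast?.getD []) ++ [PySem.List.pyGetD (x :: ts) idx 0]])
      [[x]]
      = pvGroup thr [x] (List.zip (pvDiffs (x :: ts)) ts) := by
  have hlen : (((x :: ts).length : Int)) = ((ts.length : Int) + 1) := by simp
  rw [hlen, pvRange_one_eq, List.foldl_map]
  have hzs : (List.zip (pvDiffs (x :: ts)) ts).length = ts.length := by
    simp [pvDiffs]
  have hcong : (List.range ts.length).foldl
      (fun clusters (k : Nat) =>
        if PySem.List.pyGetD (pvDiffs (x :: ts)) ((k : Int) + 1 - 1) 0 > thr then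
          clusters ++ [[PySem.List.pyGetD (x :: ts) ((k : Int) + 1) 0]]
        else
          clusters.dropLast ++ [(clusters.getLast?.getD []) ++ [PySem.List.pyGetD (x :: ts) ((k : Int) + 1) 0]])
      [[x]]
      = (List.range ts.length).foldl
        (fun clusters k =>
          (fun cl (p : Int × Int) =>
            if p.1 > thr then cl ++ [[p.2]]
            else cl.dropLast ++ [(cl.getLast?.getD []) ++ [p.2]]) clusters
            ((List.zip (pvDiffs (x :: ts)) ts).getD k (0, 0)))
      [[x]] := by
    apply PySem.List.foldl_congr_mem
    intro acc k hk
    have hk' : k < ts.length := List.mem_range.mp hk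
    have e1 : ((k : Int) + 1 - 1) = ((k : Nat) : Int) := by ring
    have e2 : ((k : Int) + 1) = ((k + 1 : Nat) : Int) := by push_cast; ring
    rw [e1, e2, PySem.List.pyGetD_natCast, PySem.List.pyGetD_natCast]
    have hd : k < (pvDiffs (x :: ts)).length := by simp [pvDiffs]; omega
    have hz : k < (List.zip (pvDiffs (x :: ts)) ts).length := by omega
    rw [List.getD_eq_getElem _ _ hd, List.getD_eq_getElem _ _ (by simp; omega),
      List.getD_eq_getElem _ _ hz]
    simp [List.getElem_zip, pvDiffs, List.getElem_zipWith]
  rw [hcong, show List.range ts.length = List.range (List.zip (pvDiffs (x :: ts)) ts).length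
      from by rw [hzs]]
  rw [pvFoldl_range_getD (List.zip (pvDiffs (x :: ts)) ts)
    (fun cl p => if p.1 > thr then cl ++ [[p.2]]
      else cl.dropLast ++ [(cl.getLast?.getD []) ++ [p.2]]) [[x]]]
  rw [show ([[x]] : List (List Int)) = [] ++ [[x]] from rfl, pvFoldl_eq_pvGroup]
  rfl

-- ===== VERDICT (by name: the statement is the Claim_ definition above) =====
theorem detect_temporal_clusters_spec : Claim_equal_detect_temporal_clusters := by
  intro tl _
  unfold Spec_detect_temporal_clusters
  match tl with
  | [] => rfl
  | [x] => simp [detect_temporal_clusters, detect_temporal_clusters_alt]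
  | x :: y :: r =>
    simp only [detect_temporal_clusters, detect_temporal_clusters_alt, compute_interval_list]
    rw [if_pos (by simp), if_neg (by simp), if_neg (by simp)]
    have hs1 : PySem.List.slice (x :: y :: r) (some 1) none = (x :: y :: r).tail := by
      simp [pysem]
    have hs2 : PySem.List.slice (x :: y :: r) none (some (-1)) = (x :: y :: r).dropLast := by
      simp [pysem]
    have h0 : PySem.List.pyGetD (x :: y :: r) 0 0 = x := by simp [pysem]
    have hm1 : PySem.List.pyGetD (x :: y :: r) (-1) 0 = (y :: r).getLastD x := by
      simp [pysem]
      rw [List.getLast?_eq_getElem?]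
      simp
      rfl
    simp only [pvIntervalList_eq, hs1, pvZipMapDiffs, hs2, pvHalf, h0, hm1]
    rw [pvFoldA x (y :: r)]
    rw [pvZipReverse _ _ (by simp [pvDiffs])]
    simp only [List.foldl_reverse]
    rw [pvFoldrPair]
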